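-- pv_equiv track=rewrite | github.com/wholien/bikei | bikei.py | rcadd
-- ===== SOURCE A (Python) =====
-- def rcadd(M):
--     # add a row and column to matrix
--     out=[]
--     for x in range(0,len(M)):
--         temp=[]
--         for y in range(0,len(M[0])):
--             temp.append(M[x][y])
--         temp.append(0)
--         out.append(temp)
--     temp=[]
--     for x in range(0,len(out[0])):
--         temp.append(0)
--     out.append(temp)
--     return out
-- ===== SOURCE B (Python) =====
-- def rcadd(M):
--     # add a row and column: build the transposed matrix (column lists) plus a new
--     # zero column, then gather it back row-wise and append the zero row
--     n, m = len(M), len(M[0])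
--     cols = [[M[x][y] for x in range(n)] for y in range(m)] + [[0] * n]
--     out = [[c[i] for c in cols] for i in range(n)]
--     out.append([0] * (m + 1))
--     return out
-- ===== Notes on version B (the rewrite author's own statement) =====
-- stated objective: alternative
-- what changed: B builds the transpose of M column-by-column, appends the new zero column as a row of that transpose, then gathers the result back row-wise, instead of A's row-by-row copy-pad-append construction.
import Mathlib
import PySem

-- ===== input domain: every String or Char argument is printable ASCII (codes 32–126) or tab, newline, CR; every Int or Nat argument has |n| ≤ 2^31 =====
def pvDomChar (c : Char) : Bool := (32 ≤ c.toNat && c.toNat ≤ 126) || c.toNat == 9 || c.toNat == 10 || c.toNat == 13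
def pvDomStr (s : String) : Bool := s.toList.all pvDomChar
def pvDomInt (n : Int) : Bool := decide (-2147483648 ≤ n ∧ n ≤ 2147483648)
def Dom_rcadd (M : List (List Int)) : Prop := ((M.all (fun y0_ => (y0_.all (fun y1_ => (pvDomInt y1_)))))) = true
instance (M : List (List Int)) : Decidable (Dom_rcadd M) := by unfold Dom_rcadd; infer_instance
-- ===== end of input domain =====

-- B builds the transposed matrix (column lists) plus the new zero column, then gathers it
-- back row-wise and appends the zero row, instead of A's row-by-row copy-pad-append
-- construction (objective: alternative algorithm, same cost).

-- ===== PORT A =====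
def rcadd (M : List (List Int)) : List (List Int) :=
  let out : List (List Int) :=
    (PySem.List.pyRange 0 (M.length : Int) 1).foldl (fun out x =>
      let temp : List Int :=
        (PySem.List.pyRange 0 ((PySem.List.pyGetD M 0 []).length : Int) 1).foldl
          (fun temp y => temp ++ [PySem.List.pyGetD (PySem.List.pyGetD M x []) y 0]) []
      let temp2 := temp ++ [0]
      out ++ [temp2]) []
  let temp : List Int :=
    (PySem.List.pyRange 0 ((PySem.List.pyGetD out 0 []).length : Int) 1).foldl
      (fun temp _x => temp ++ [(0 : Int)]) []
  out ++ [temp]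

-- ===== PORT B =====
def rcadd_alt (M : List (List Int)) : List (List Int) :=
  let n := M.length
  let m := (PySem.List.pyGetD M 0 []).length
  let cols : List (List Int) :=
    ((List.range m).map (fun (y : Nat) =>
        (List.range n).map (fun (x : Nat) =>
          PySem.List.pyGetD (PySem.List.pyGetD M (x : Int) []) (y : Int) 0)))
      ++ [List.replicate n (0 : Int)]
  let out : List (List Int) :=
    (List.range n).map (fun (i : Nat) => cols.map (fun c => PySem.List.pyGetD c (i : Int) 0))
  out ++ [List.replicate (m + 1) (0 : Int)]

-- ===== PRECONDITION & SPEC =====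
-- Pre_ excludes exactly the inputs where the Python A raises IndexError: the empty matrix
-- (A indexes out[0] of an empty out) and matrices with a row shorter than the first row
-- (A indexes M[x][y] past the row's end). B raises there identically.
def Pre_rcadd (M : List (List Int)) : Prop :=
  M ≠ [] ∧ ∀ r ∈ M, M.headI.length ≤ r.length
instance (M : List (List Int)) : Decidable (Pre_rcadd M) := by unfold Pre_rcadd; infer_instance
def pvWitness_rcadd : List (List Int) := [[1, 2], [3, 4]]

def Spec_rcadd (M : List (List Int)) (out : List (List Int)) : Prop := out = rcadd_alt M
instance (M : List (List Int)) (out : List (List Int)) : Decidable (Spec_rcadd M out) := by unfold Spec_rcadd; infer_instance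

-- ===== CLAIM (what is proved, stated in full; the proofs are below) =====
def Claim_equal_rcadd : Prop := ∀ (M : List (List Int)), Dom_rcadd M → Pre_rcadd M → Spec_rcadd M (rcadd M)

-- ===== LEMMAS AND PROOFS =====

theorem pv_map_range_getD {α β} (xs : List α) (d : α) (f : α → β) :
    (List.range xs.length).map (fun k => f (xs.getD k d)) = xs.map f := by
  apply List.ext_getElem
  · simp
  · intro i h1 h2
    simp only [List.getElem_map, List.getElem_range]
    rw [List.getD_eq_getElem xs d (by simpa using h2)]

theorem pv_map_range_getD_take {α} (row : List α) (d : α) (m : Nat) (h : m ≤ row.length) :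
    (List.range m).map (fun k => row.getD k d) = row.take m := by
  apply List.ext_getElem
  · simp [h]
  · intro i h1 h2
    simp only [List.getElem_map, List.getElem_range, List.getElem_take]
    exact List.getD_eq_getElem row d (lt_of_lt_of_le (by simpa using h1) h)

-- the interior: rows indexed over range, each truncated to the first row's width
theorem pv_interior (M : List (List Int)) (h2 : ∀ r ∈ M, M.headI.length ≤ r.length) :
    (List.range M.length).map (fun k =>
        (List.range M.headI.length).map (fun j => ((M.getD k []).getD j 0)) ++ [(0 : Int)])
      = M.map (fun r => r.take M.headI.length ++ [0]) := by
  rw [← pv_map_range_getD M [] (fun r => r.take M.headI.length ++ [0])]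
  apply List.map_congr_left
  intro k hk
  rw [pv_map_range_getD_take (M.getD k []) 0 M.headI.length]
  apply h2
  rw [List.getD_eq_getElem M [] (by simpa using hk)]
  exact List.getElem_mem _

theorem pv_headI_eq (M : List (List Int)) (h1 : M ≠ []) :
    PySem.List.pyGetD M 0 [] = M.headI := by
  cases M with
  | nil => simp at h1
  | cons r rest => simp [PySem.List.pyGetD, PySem.List.pyGet?, PySem.List.pyIdx?]

theorem pv_zero_row (k : Nat) :
    (PySem.List.pyRange 0 (k : Int) 1).foldl (fun t (_ : Int) => t ++ [(0 : Int)]) []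
      = List.replicate k (0 : Int) := by
  simp only [PySem.List.foldl_append_singleton_eq_map, List.nil_append,
    PySem.List.pyRange_zero_nat, List.map_map, Function.comp_def, List.map_const',
    List.length_range]

theorem rcadd_eq (M : List (List Int)) (h1 : M ≠ []) (h2 : ∀ r ∈ M, M.headI.length ≤ r.length) :
    rcadd M = M.map (fun r => r.take M.headI.length ++ [0])
      ++ [List.replicate (M.headI.length + 1) 0] := by
  have hout :
      ((PySem.List.pyRange 0 (M.length : Int) 1).foldl (fun out x =>
          out ++ [((PySem.List.pyRange 0 ((PySem.List.pyGetD M 0 []).length : Int) 1).foldl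
            (fun temp y => temp ++ [PySem.List.pyGetD (PySem.List.pyGetD M x []) y 0]) []) ++ [0]]) [])
        = M.map (fun r => r.take M.headI.length ++ [0]) := by
    rw [pv_headI_eq M h1]
    simp only [PySem.List.foldl_append_singleton_eq_map, List.nil_append,
      PySem.List.pyRange_zero_nat, List.map_map, Function.comp_def, PySem.List.pyGetD_natCast]
    exact pv_interior M h2
  simp only [rcadd]
  rw [hout]
  have hfl : (PySem.List.pyGetD (M.map (fun r => r.take M.headI.length ++ [0])) 0 []).length
      = M.headI.length + 1 := by
    rw [pv_headI_eq _ (by simp [h1])]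
    cases M with
    | nil => exact absurd rfl h1
    | cons r rest => simp [List.headI]
  rw [hfl, pv_zero_row]

-- getD of a map over range at an in-range index
theorem pv_getD_map_range {β} (k i : Nat) (g : Nat → β) (d : β) (h : i < k) :
    ((List.range k).map g).getD i d = g i := by
  rw [List.getD_eq_getElem _ d (by simpa using h)]
  simp

theorem pv_getD_replicate {α} (k i : Nat) (a : α) :
    (List.replicate k a).getD i a = a := by
  rcases lt_or_ge i k with h | h
  · rw [List.getD_eq_getElem _ a (by simpa using h)]; simp
  · rw [List.getD_eq_default _ a (by simpa using h)]

theorem rcadd_alt_eq (M : List (List Int)) (h1 : M ≠ []) (h2 : ∀ r ∈ M, M.headI.length ≤ r.length) :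
    rcadd_alt M = M.map (fun r => r.take M.headI.length ++ [0])
      ++ [List.replicate (M.headI.length + 1) 0] := by
  simp only [rcadd_alt]
  rw [pv_headI_eq M h1]
  congr 1
  rw [← pv_interior M h2]
  apply List.map_congr_left
  intro i hi
  have hi' : i < M.length := by simpa using hi
  simp only [List.map_append, List.map_map, List.map_cons, List.map_nil, Function.comp_def,
    PySem.List.pyGetD_natCast]
  congr 1
  · apply List.map_congr_left
    intro y _
    exact pv_getD_map_range M.length i
      (fun x => (M.getD x []).getD y 0) 0 hi'
  · rw [pv_getD_replicate M.length i 0]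

-- ===== VERDICT (by name: the statement is the Claim_ definition above) =====
theorem rcadd_spec : Claim_equal_rcadd := by
  intro M _ hpre
  unfold Spec_rcadd
  rw [rcadd_eq M hpre.1 hpre.2, rcadd_alt_eq M hpre.1 hpre.2]
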